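-- pv_equiv track=rewrite | github.com/RamananVr/Leetcodepython | trees_game_theory/2005_unknown_title.py | subtreeRemovalGame
-- ===== SOURCE A (Python) =====
-- from collections import defaultdict
--
-- def subtreeRemovalGame(n, edges):
--     """
--     Determines the winner of the subtree removal game on a Fibonacci tree.
--
--     :param n: int - Number of nodes in the tree
--     :param edges: List[List[int]] - List of edges in the tree
--     :return: str - "Alice" if Alice wins, "Bob" if Bob wins
--     """
--     # Build the adjacency list for the tree
--     tree = defaultdict(list)
--     for u, v in edges:
--         tree[u].append(v)
--         tree[v].append(u)
--
--     # Helper function to calculate the size of each subtree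
--     def calculate_subtree_sizes(node, parent):
--         size = 1
--         for neighbor in tree[node]:
--             if neighbor != parent:
--                 size += calculate_subtree_sizes(neighbor, node)
--         subtree_sizes[node] = size
--         return size
--
--     # Helper function to determine if a node is a winning position
--     def is_winning_position(node, parent):
--         xor_sum = 0
--         for neighbor in tree[node]:
--             if neighbor != parent:
--                 xor_sum ^= subtree_sizes[neighbor]
--         return xor_sum != 0
--
--     # Calculate subtree sizes
--     subtree_sizes = {}
--     calculate_subtree_sizes(1, -1)
--
--     # Check if the root is a winning position
--     if is_winning_position(1, -1):
--         return "Alice"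
--     else:
--         return "Bob"
-- ===== SOURCE B (Python) =====
-- from collections import defaultdict
--
-- def subtreeRemovalGame(n, edges):
--     # Iterative: BFS from node 1 for parents + order, then one reverse pass
--     # computes subtree sizes; XOR the sizes of node 1's children.
--     adj = defaultdict(list)
--     for u, v in edges:
--         adj[u].append(v)
--         adj[v].append(u)
--     parent = {1: -1}
--     order = [1]
--     i = 0
--     while i < len(order):
--         v = order[i]
--         i += 1
--         for w in adj[v]:
--             if w not in parent:
--                 parent[w] = v
--                 order.append(w)
--     sizes = {}
--     for v in reversed(order):
--         s = 1
--         for w in adj[v]: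
--             if w != parent[v]:
--                 s += sizes[w]
--         sizes[v] = s
--     xor = 0
--     for w in adj[1]:
--         xor ^= sizes[w]
--     return "Alice" if xor != 0 else "Bob"
-- ===== Notes on version B (the rewrite author's own statement) =====
-- stated objective: alternative
-- what changed: Replaces A's recursive DFS (which threads a sizes dict through nested recursion and can overflow the stack on deep trees) by an iterative BFS from node 1 that builds parent pointers and a visit order, followed by a single reverse-order pass computing subtree sizes, then XORing the sizes of node 1's children.
-- outside the precondition, e.g. on subtreeRemovalGame(2, [[1, -1]]): A returns 'Bob', B returns 'Alice'; on subtreeRemovalGame(3, [[1, 2], [2, 2]]): A returns 'Alice', B raises KeyError; on subtreeRemovalGame(3, [[1, 2], [2, 3], [1, 3]]): A raises RecursionError, B raises KeyError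
import Mathlib
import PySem

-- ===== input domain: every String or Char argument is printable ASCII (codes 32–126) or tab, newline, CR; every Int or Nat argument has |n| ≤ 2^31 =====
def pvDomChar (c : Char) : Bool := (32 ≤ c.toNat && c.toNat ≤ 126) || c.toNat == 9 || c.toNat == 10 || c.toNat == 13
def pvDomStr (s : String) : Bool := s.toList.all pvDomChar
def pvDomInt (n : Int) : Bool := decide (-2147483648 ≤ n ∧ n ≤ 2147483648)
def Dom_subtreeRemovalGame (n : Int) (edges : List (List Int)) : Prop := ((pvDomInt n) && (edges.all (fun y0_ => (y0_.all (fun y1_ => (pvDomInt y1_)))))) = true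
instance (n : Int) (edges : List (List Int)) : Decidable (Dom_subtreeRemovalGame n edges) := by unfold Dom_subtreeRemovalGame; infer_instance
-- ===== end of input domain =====

-- B replaces A's recursive DFS (dict-threading) by an iterative BFS + one reverse-order
-- pass computing the subtree sizes; same return value on Pre_ (objective: alternative).

-- ===== PORT A =====
-- tree = defaultdict(list); for u, v in edges: tree[u].append(v); tree[v].append(u)
-- (an edge not of length 2 makes Python raise ValueError; excluded by Pre_)
def pvAddEdge (d : PySem.Dict Int (List Int)) (e : List Int) : PySem.Dict Int (List Int) :=
  match e with
  | [u, v] => (d.modify u [] (fun l => l ++ [v])).modify v [] (fun l => l ++ [u])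
  | _ => d

def pvAdj (edges : List (List Int)) : PySem.Dict Int (List Int) :=
  edges.foldl pvAddEdge PySem.Dict.empty

-- calculate_subtree_sizes, with fuel making the recursion total (Python diverges /
-- hits RecursionError on inputs excluded by Pre_; under Pre_ the fuel never runs out)
mutual
def pvCalc (adj : PySem.Dict Int (List Int)) (f : Nat) (node parent : Int)
    (szs : PySem.Dict Int Int) : Int × PySem.Dict Int Int :=
  match f with
  | 0 => (0, szs)
  | f + 1 =>
    let r := pvCalcList adj f (adj.getD node []) node parent 1 szs
    (r.1, r.2.insert node r.1)
def pvCalcList (adj : PySem.Dict Int (List Int)) (f : Nat) (l : List Int)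
    (node parent : Int) (acc : Int) (szs : PySem.Dict Int Int) : Int × PySem.Dict Int Int :=
  match l with
  | [] => (acc, szs)
  | nb :: rest =>
    if nb ≠ parent then
      let r := pvCalc adj f nb node szs
      pvCalcList adj f rest node parent (acc + r.1) r.2
    else pvCalcList adj f rest node parent acc szs
end
def subtreeRemovalGame (n : Int) (edges : List (List Int)) : String :=
  let tree := pvAdj edges
  let szs := (pvCalc tree (2 * edges.length + 3) 1 (-1) PySem.Dict.empty).2
  let x := (tree.getD 1 []).foldl
      (fun a nb => if nb ≠ -1 then PySem.Int.bxor a (szs.getD nb 0) else a) 0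
  if x ≠ 0 then "Alice" else "Bob"

-- ===== PORT B =====
-- BFS from node 1 (parent pointers + visit order), fuel-guarded the same way
def pvBfs (adj : PySem.Dict Int (List Int)) :
    Nat → List Int → PySem.Dict Int Int → List Int → PySem.Dict Int Int × List Int
  | 0, _, par, order => (par, order)
  | _ + 1, [], par, order => (par, order)
  | f + 1, v :: rest, par, order =>
    let st := (adj.getD v []).foldl
        (fun (st : PySem.Dict Int Int × List Int) w =>
          if st.1.contains w then st else (st.1.insert w v, st.2 ++ [w]))
        (par, ([] : List Int))
    pvBfs adj f (rest ++ st.2) st.1 (order ++ st.2)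

-- for v in reversed(order): sizes[v] = 1 + sum of sizes of non-parent neighbours
def pvSizes (adj : PySem.Dict Int (List Int)) (par : PySem.Dict Int Int)
    (order : List Int) : PySem.Dict Int Int :=
  order.reverse.foldl
    (fun szs v =>
      let s := (adj.getD v []).foldl
        (fun s w => if w ≠ par.getD v 0 then s + szs.getD w 0 else s) 1
      szs.insert v s)
    PySem.Dict.empty

def subtreeRemovalGame_alt (n : Int) (edges : List (List Int)) : String :=
  let adj := pvAdj edges
  let pr := pvBfs adj (2 * edges.length + 3) [1] (PySem.Dict.empty.insert 1 (-1)) [1]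
  let sizes := pvSizes adj pr.1 pr.2
  let x := (adj.getD 1 []).foldl (fun a w => PySem.Int.bxor a (sizes.getD w 0)) 0
  if x ≠ 0 then "Alice" else "Bob"

-- ===== PRECONDITION & SPEC =====
-- input-shape helpers for the precondition (independent of both ports)
def pvPairs (edges : List (List Int)) : List (Int × Int) :=
  edges.flatMap (fun e => match e with | [u, v] => [(u, v), (v, u)] | _ => [])
def pvVerts (edges : List (List Int)) : List Int := (pvPairs edges).map (·.1)
def pvAdjOf (edges : List (List Int)) (v : Int) : List Int :=
  ((pvPairs edges).filter (fun p => p.1 == v)).map (·.2)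
def pvK (edges : List (List Int)) : Nat := 2 * edges.length + 2
-- vertices reachable from node 1 in at most k steps (standard BFS distance)
def pvReach (edges : List (List Int)) : Nat → List Int
  | 0 => [1]
  | k + 1 =>
    let r := pvReach edges k
    r ++ (pvVerts edges).filter
      (fun w => !(r.contains w) && r.any (fun u => (pvAdjOf edges u).contains w))
def pvDist (edges : List (List Int)) (v : Int) : Option Nat :=
  (List.range (pvK edges + 1)).find? (fun k => (pvReach edges k).contains v)
def pvParFilter (edges : List (List Int)) (v : Int) : List Int :=
  (pvAdjOf edges v).filter (fun w => (pvDist edges w).map (· + 1) == pvDist edges v)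
-- local tree shape at v: neighbours sit one BFS level away, with a unique parent
def pvClauseB (edges : List (List Int)) (v : Int) : Bool :=
  match pvDist edges v with
  | none => true
  | some d =>
    decide (d + 1 < pvK edges) &&
    (pvAdjOf edges v).all (fun w =>
      pvDist edges w == some (d + 1) ||
      (decide (1 ≤ d) && (pvDist edges w == some (d - 1)))) &&
    (decide (d = 0) || (!(pvParFilter edges v).isEmpty &&
      (pvParFilter edges v).all (fun u => u == (pvParFilter edges v).headI)))
-- Pre_ excludes: edges that are not pairs (Python A raises ValueError unpacking them);
-- inputs whose component of node 1 is not a tree up to repeated parallel edges —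
-- cycles make A overflow the stack (RecursionError) and self-loops make B raise
-- KeyError; and an edge joining node 1 and -1: -1 is not a valid node label (A
-- reserves it as the root's virtual parent), so A's skipping of a neighbour -1 and
-- B's ordinary-node treatment are both defensible on that unspecified corner.
def pvTree (edges : List (List Int)) : Prop :=
  (∀ p ∈ pvPairs edges, p.1 = 1 → p.2 ≠ -1) ∧
  pvDist edges 1 = some 0 ∧
  (∀ v ∈ pvVerts edges, pvClauseB edges v = true)
def Pre_subtreeRemovalGame (n : Int) (edges : List (List Int)) : Prop :=
  (∀ e ∈ edges, e.length = 2) ∧ pvTree edges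
instance (n : Int) (edges : List (List Int)) : Decidable (Pre_subtreeRemovalGame n edges) := by
  unfold Pre_subtreeRemovalGame pvTree; infer_instance

def pvWitness_subtreeRemovalGame : Int × List (List Int) := (5, [[1, 2], [1, 3], [3, 4]])

def Spec_subtreeRemovalGame (n : Int) (edges : List (List Int)) (out : String) : Prop := out = subtreeRemovalGame_alt n edges
instance (n : Int) (edges : List (List Int)) (out : String) : Decidable (Spec_subtreeRemovalGame n edges out) := by unfold Spec_subtreeRemovalGame; infer_instance

-- ===== CLAIM (what is proved, stated in full; the proofs are below) =====
def Claim_equal_subtreeRemovalGame : Prop := ∀ (n : Int) (edges : List (List Int)), Dom_subtreeRemovalGame n edges → Pre_subtreeRemovalGame n edges → Spec_subtreeRemovalGame n edges (subtreeRemovalGame n edges)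

-- ===== LEMMAS AND PROOFS =====

-- ----- basic adjacency lemmas -----

theorem pv_pairs_edge_symm {e : List Int} {a b : Int} :
    (a, b) ∈ (match e with | [u, v] => [(u, v), (v, u)] | _ => ([] : List (Int × Int))) ↔
    (b, a) ∈ (match e with | [u, v] => [(u, v), (v, u)] | _ => ([] : List (Int × Int))) := by
  rcases e with _ | ⟨u, _ | ⟨v, _ | ⟨w, t⟩⟩⟩ <;> simp <;> tauto

theorem pv_pairs_symm {edges : List (List Int)} {a b : Int} :
    (a, b) ∈ pvPairs edges ↔ (b, a) ∈ pvPairs edges := by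
  induction edges with
  | nil => simp [pvPairs]
  | cons e rest ih =>
    simp only [pvPairs, List.flatMap_cons, List.mem_append] at *
    constructor <;> rintro (h | h)
    · exact Or.inl (pv_pairs_edge_symm.mp h)
    · exact Or.inr (ih.mp h)
    · exact Or.inl (pv_pairs_edge_symm.mp h)
    · exact Or.inr (ih.mpr h)

theorem pv_mem_adjOf {edges : List (List Int)} {v w : Int} :
    w ∈ pvAdjOf edges v ↔ (v, w) ∈ pvPairs edges := by
  simp only [pvAdjOf, List.mem_map, List.mem_filter]
  constructor
  · rintro ⟨⟨x, y⟩, ⟨hm, hx⟩, rfl⟩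
    simp only [beq_iff_eq] at hx; subst hx; exact hm
  · intro hm; exact ⟨(v, w), ⟨hm, by simp⟩, rfl⟩

theorem pv_adj_symm {edges : List (List Int)} {v w : Int} :
    w ∈ pvAdjOf edges v ↔ v ∈ pvAdjOf edges w := by
  rw [pv_mem_adjOf, pv_mem_adjOf, pv_pairs_symm]

theorem pv_adj_mem_verts {edges : List (List Int)} {v w : Int}
    (h : w ∈ pvAdjOf edges v) : w ∈ pvVerts edges := by
  have : (w, v) ∈ pvPairs edges := pv_pairs_symm.mp (pv_mem_adjOf.mp h)
  exact List.mem_map.mpr ⟨(w, v), this, rfl⟩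

theorem pv_src_mem_verts {edges : List (List Int)} {v w : Int}
    (h : w ∈ pvAdjOf edges v) : v ∈ pvVerts edges :=
  List.mem_map.mpr ⟨(v, w), pv_mem_adjOf.mp h, rfl⟩

theorem pv_adj_ne_neg_one {edges : List (List Int)} {w : Int}
    (h1 : ∀ p ∈ pvPairs edges, p.1 = 1 → p.2 ≠ -1) (h : w ∈ pvAdjOf edges 1) : w ≠ -1 :=
  h1 (1, w) (pv_mem_adjOf.mp h) rfl

theorem pv_adj_foldl_pairs (edges : List (List Int)) : ∀ d : PySem.Dict Int (List Int),
    edges.foldl pvAddEdge d =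
      (pvPairs edges).foldl (fun d p => d.modify p.1 [] (· ++ [p.2])) d := by
  induction edges with
  | nil => intro d; rfl
  | cons e rest ih =>
    intro d
    have hsplit : pvPairs (e :: rest) =
        (match e with | [u, v] => [(u, v), (v, u)] | _ => ([] : List (Int × Int))) ++ pvPairs rest := by
      simp [pvPairs]
    rw [List.foldl_cons, ih, hsplit, List.foldl_append]
    congr 1
    rcases e with _ | ⟨u, _ | ⟨v, _ | ⟨w, t⟩⟩⟩ <;> rfl

theorem pv_adj_getD (edges : List (List Int)) (v : Int) :
    (pvAdj edges).getD v [] = pvAdjOf edges v := by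
  unfold pvAdj
  rw [pv_adj_foldl_pairs, PySem.Dict.getD_foldl_modify_append]
  simp [pvAdjOf]

theorem pv_pairs_len (edges : List (List Int)) :
    (pvPairs edges).length ≤ 2 * edges.length := by
  induction edges with
  | nil => simp [pvPairs]
  | cons e rest ih =>
    have : pvPairs (e :: rest) =
        (match e with | [u, v] => [(u, v), (v, u)] | _ => ([] : List (Int × Int))) ++ pvPairs rest := by
      simp [pvPairs]
    rw [this, List.length_append, List.length_cons]
    rcases e with _ | ⟨u, _ | ⟨v, _ | ⟨w, t⟩⟩⟩ <;> simp <;> omega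

-- ----- the tree clauses -----

theorem pv_clause {edges : List (List Int)} {v : Int} {d : Nat} (h : pvTree edges)
    (hv : v ∈ pvVerts edges) (hd : pvDist edges v = some d) :
    d + 1 < pvK edges ∧
    (∀ w ∈ pvAdjOf edges v, pvDist edges w = some (d + 1) ∨
        ∃ d', d = d' + 1 ∧ pvDist edges w = some d') ∧
    (∀ d', d = d' + 1 → pvParFilter edges v ≠ [] ∧
        ∀ u ∈ pvParFilter edges v, u = (pvParFilter edges v).headI) := by
  have hc := h.2.2 v hv
  rw [pvClauseB, hd] at hc
  simp only [Bool.and_eq_true, Bool.or_eq_true, List.all_eq_true, decide_eq_true_eq,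
    beq_iff_eq, Bool.not_eq_eq_eq_not, Bool.not_true] at hc
  obtain ⟨⟨hlt, hall⟩, hpar⟩ := hc
  refine ⟨hlt, ?_, ?_⟩
  · intro w hw
    rcases hall w hw with h1 | ⟨h1, h2⟩
    · exact Or.inl h1
    · exact Or.inr ⟨d - 1, by omega, h2⟩
  · intro d' hd'
    rcases hpar with h0 | ⟨h0a, h0b⟩
    · omega
    · refine ⟨?_, h0b⟩
      intro hnil
      rw [hnil] at h0a
      simp at h0a

def pvChl (edges : List (List Int)) (v : Int) : List Int :=
  (pvAdjOf edges v).filter (fun w => pvDist edges w == (pvDist edges v).map (· + 1))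
def pvParOf (edges : List (List Int)) (v : Int) : Int := (pvParFilter edges v).headI

theorem pv_mem_chl {edges : List (List Int)} {v w : Int} {d : Nat}
    (hd : pvDist edges v = some d) :
    w ∈ pvChl edges v ↔ w ∈ pvAdjOf edges v ∧ pvDist edges w = some (d + 1) := by
  simp [pvChl, hd, List.mem_filter]

theorem pv_par_spec {edges : List (List Int)} {v : Int} {d' : Nat} (h : pvTree edges)
    (hv : v ∈ pvVerts edges) (hd : pvDist edges v = some (d' + 1)) :
    pvParOf edges v ∈ pvAdjOf edges v ∧ pvDist edges (pvParOf edges v) = some d' := by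
  have hne := ((pv_clause h hv hd).2.2 d' rfl).1
  have hmem : pvParOf edges v ∈ pvParFilter edges v := by
    rw [pvParOf]
    rcases hfe : pvParFilter edges v with _ | ⟨a, t⟩
    · exact absurd hfe hne
    · simp
  rw [pvParFilter, List.mem_filter] at hmem
  obtain ⟨h1, h2⟩ := hmem
  simp only [beq_iff_eq, hd] at h2
  refine ⟨h1, ?_⟩
  rcases hdist : pvDist edges (pvParOf edges v) with _ | x
  · rw [hdist] at h2; simp at h2
  · rw [hdist] at h2
    simp only [Option.map_some, Option.some.injEq] at h2
    exact congrArg some (by omega)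

theorem pv_par_unique {edges : List (List Int)} {v w : Int} {d' : Nat} (h : pvTree edges)
    (hv : v ∈ pvVerts edges) (hd : pvDist edges v = some (d' + 1))
    (hw : w ∈ pvAdjOf edges v) (hdw : pvDist edges w = some d') : w = pvParOf edges v := by
  have hmem : w ∈ pvParFilter edges v := by
    rw [pvParFilter]
    refine List.mem_filter.mpr ⟨hw, ?_⟩
    simp [hdw, hd]
  exact ((pv_clause h hv hd).2.2 d' rfl).2 w hmem

theorem pv_parOf_child {edges : List (List Int)} {v w : Int} {d : Nat} (h : pvTree edges)
    (hd : pvDist edges v = some d) (hw : w ∈ pvChl edges v) : pvParOf edges w = v := by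
  obtain ⟨hadj, hdw⟩ := (pv_mem_chl hd).mp hw
  have hwv : v ∈ pvAdjOf edges w := pv_adj_symm.mp hadj
  have hwverts : w ∈ pvVerts edges := pv_adj_mem_verts hadj
  exact (pv_par_unique h hwverts hdw hwv hd).symm

theorem pv_chl_ne_self {edges : List (List Int)} {v w : Int} {d : Nat}
    (hd : pvDist edges v = some d) (hw : w ∈ pvChl edges v) : w ≠ v := by
  obtain ⟨_, hdw⟩ := (pv_mem_chl hd).mp hw
  intro hvw; rw [hvw, hd] at hdw; simp only [Option.some.injEq] at hdw; omega

theorem pv_chl_ne_one {edges : List (List Int)} {v w : Int} {d : Nat} (h : pvTree edges)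
    (hd : pvDist edges v = some d) (hw : w ∈ pvChl edges v) : w ≠ 1 := by
  obtain ⟨_, hdw⟩ := (pv_mem_chl hd).mp hw
  intro h1; rw [h1] at hdw; rw [h.2.1] at hdw; simp at hdw

-- which neighbours pass the port's "≠ parent" test: exactly the children
theorem pv_split_root {edges : List (List Int)} {w : Int} (h : pvTree edges)
    (hw : w ∈ pvAdjOf edges 1) : (w ≠ (-1 : Int) ↔ pvDist edges w = some 1) := by
  have hv : (1 : Int) ∈ pvVerts edges := pv_src_mem_verts hw
  have hcl := (pv_clause h hv h.2.1).2.1 w hw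
  constructor
  · intro _
    rcases hcl with h1 | ⟨d', hd', _⟩
    · exact h1
    · omega
  · intro _; exact pv_adj_ne_neg_one h.1 hw

theorem pv_split_nonroot {edges : List (List Int)} {v w : Int} {d' : Nat} (h : pvTree edges)
    (hv : v ∈ pvVerts edges) (hd : pvDist edges v = some (d' + 1))
    (hw : w ∈ pvAdjOf edges v) :
    (w ≠ pvParOf edges v ↔ pvDist edges w = some (d' + 1 + 1)) := by
  have hcl := (pv_clause h hv hd).2.1 w hw
  constructor
  · intro hne
    rcases hcl with h1 | ⟨d'', hd'', h2⟩
    · exact h1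
    · have : d'' = d' := by omega
      subst this
      exact absurd (pv_par_unique h hv hd hw h2) hne
  · intro hdw heq
    have hps := (pv_par_spec h hv hd).2
    rw [heq, hps] at hdw
    simp only [Option.some.injEq] at hdw
    omega

theorem pv_filter_eq_chl {edges : List (List Int)} {v p : Int} {d : Nat} (h : pvTree edges)
    (hd : pvDist edges v = some d)
    (hsplit : ∀ w ∈ pvAdjOf edges v, (w ≠ p ↔ pvDist edges w = some (d + 1))) :
    (pvAdjOf edges v).filter (fun w => w ≠ p) = pvChl edges v := by
  rw [pvChl]
  apply List.filter_congr
  intro w hw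
  have hiff := hsplit w hw
  simp only [hd, Option.map_some]
  have hb : (pvDist edges w == some (d + 1)) = decide (pvDist edges w = some (d + 1)) := by
    by_cases hh : pvDist edges w = some (d + 1) <;> simp [hh]
  rw [hb, decide_eq_decide]
  exact hiff

-- ----- canonical subtree sizes -----

def pvCsz (edges : List (List Int)) : Nat → Int → Int
  | 0, _ => 1
  | f + 1, v => 1 + ((pvChl edges v).map (fun w => pvCsz edges f w)).sum

def pvSZ (edges : List (List Int)) (v : Int) : Int := pvCsz edges (pvK edges) v

theorem pv_csz_irrel {edges : List (List Int)} (h : pvTree edges) :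
    ∀ f g (v : Int) (d : Nat), v ∈ pvVerts edges → pvDist edges v = some d →
      pvK edges ≤ f + d → pvK edges ≤ g + d → pvCsz edges f v = pvCsz edges g v := by
  intro f
  induction f with
  | zero =>
    intro g v d hv hd hf _
    have := (pv_clause h hv hd).1
    omega
  | succ f ih =>
    intro g v d hv hd hf hg
    have hlt := (pv_clause h hv hd).1
    obtain ⟨g', rfl⟩ : ∃ g', g = g' + 1 := ⟨g - 1, by omega⟩
    show 1 + _ = 1 + _
    congr 1
    apply congrArg List.sum
    apply List.map_congr_left
    intro w hw
    obtain ⟨hadj, hdw⟩ := (pv_mem_chl hd).mp hw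
    exact ih g' w (d + 1) (pv_adj_mem_verts hadj) hdw (by omega) (by omega)

theorem pv_SZ_unfold {edges : List (List Int)} {v : Int} {d : Nat} (h : pvTree edges)
    (hd : pvDist edges v = some d) :
    pvSZ edges v = 1 + ((pvChl edges v).map (pvSZ edges)).sum := by
  have hK : ∃ K', pvK edges = K' + 1 := ⟨2 * edges.length + 1, rfl⟩
  obtain ⟨K', hK⟩ := hK
  rw [pvSZ, hK]
  show 1 + _ = 1 + _
  congr 1
  apply congrArg List.sum
  apply List.map_congr_left
  intro w hw
  obtain ⟨hadj, hdw⟩ := (pv_mem_chl hd).mp hw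
  rw [pvSZ]
  exact pv_csz_irrel h K' (pvK edges) w (d + 1) (pv_adj_mem_verts hadj) hdw (by omega) (by omega)

-- ----- generic fold helpers -----
-- ----- generic fold helpers -----

theorem pv_foldl_if_sum (p : Int) (g : Int → Int) :
    ∀ (l : List Int) (a : Int),
      l.foldl (fun s w => if w ≠ p then s + g w else s) a =
        a + ((l.filter (fun w => w ≠ p)).map g).sum := by
  intro l
  induction l with
  | nil => intro a; simp
  | cons w rest ih =>
    intro a
    simp only [List.foldl_cons, List.filter_cons]
    by_cases hw : w ≠ p
    · rw [if_pos hw, ih, if_pos (by simpa using hw)]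
      simp only [List.map_cons, List.sum_cons]
      ring
    · rw [if_neg hw, ih, if_neg (by simpa using hw)]

-- ----- the DFS side (port A computes pvSZ) -----

def pvGood (edges : List (List Int)) (szs : PySem.Dict Int Int) : Prop :=
  ∀ k val, szs.get? k = some val → val = pvSZ edges k

def pvConcl (edges : List (List Int)) (szs : PySem.Dict Int Int) (v : Int)
    (r : Int × PySem.Dict Int Int) : Prop :=
  r.1 = pvSZ edges v ∧ pvGood edges r.2 ∧
  (∀ k val, szs.get? k = some val → r.2.get? k = some val) ∧
  r.2.get? v = some (pvSZ edges v)

theorem pv_hsplit_child {edges : List (List Int)} {v w : Int} {d : Nat} (h : pvTree edges)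
    (hd : pvDist edges v = some d) (hw : w ∈ pvChl edges v) :
    ∀ u ∈ pvAdjOf edges w, (u ≠ v ↔ pvDist edges u = some (d + 1 + 1)) := by
  obtain ⟨hadj, hdw⟩ := (pv_mem_chl hd).mp hw
  have hwverts : w ∈ pvVerts edges := pv_adj_mem_verts hadj
  have hpar : pvParOf edges w = v := pv_parOf_child h hd hw
  intro u hu
  rw [← hpar]
  exact pv_split_nonroot h hwverts hdw hu

theorem pv_dfs_list {edges : List (List Int)} (h : pvTree edges) (f : Nat) (v : Int)
    (d : Nat) (p : Int)
    (hd : pvDist edges v = some d)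
    (hsplit : ∀ w ∈ pvAdjOf edges v, (w ≠ p ↔ pvDist edges w = some (d + 1)))
    (HMain : ∀ (v' : Int) (d' : Nat) (p' : Int) (szs' : PySem.Dict Int Int),
      (v' = 1 ∨ v' ∈ pvVerts edges) → pvDist edges v' = some d' → pvK edges ≤ f + d' →
      (∀ w ∈ pvAdjOf edges v', (w ≠ p' ↔ pvDist edges w = some (d' + 1))) →
      pvGood edges szs' →
      pvConcl edges szs' v' (pvCalc (pvAdj edges) f v' p' szs'))
    (hK : pvK edges ≤ f + 1 + d) :
    ∀ (l : List Int) (acc : Int) (szs : PySem.Dict Int Int),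
      (∀ w ∈ l, w ∈ pvAdjOf edges v) → pvGood edges szs →
      (pvCalcList (pvAdj edges) f l v p acc szs).1 =
        acc + ((l.filter (fun w => w ≠ p)).map (pvSZ edges)).sum ∧
      pvGood edges (pvCalcList (pvAdj edges) f l v p acc szs).2 ∧
      (∀ k val, szs.get? k = some val →
        (pvCalcList (pvAdj edges) f l v p acc szs).2.get? k = some val) ∧
      (∀ w ∈ l, w ≠ p →
        (pvCalcList (pvAdj edges) f l v p acc szs).2.get? w = some (pvSZ edges w)) := by
  intro l
  induction l with
  | nil =>
    intro acc szs _ hg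
    simp only [pvCalcList]
    exact ⟨by simp, hg, fun k val hk => hk, by simp⟩
  | cons w rest ih =>
    intro acc szs hl hg
    by_cases hwp : w = p
    · have hred : pvCalcList (pvAdj edges) f (w :: rest) v p acc szs =
          pvCalcList (pvAdj edges) f rest v p acc szs := by
        simp only [pvCalcList]
        rw [if_neg (by simp [hwp])]
      rw [hred]
      obtain ⟨hsum, hgood, hmono, hpres⟩ :=
        ih acc szs (fun u hu => hl u (by simp [hu])) hg
      refine ⟨?_, hgood, hmono, ?_⟩
      · rw [hsum]
        congr 2
        rw [List.filter_cons]
        simp [hwp]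
      · intro u hu hup
        rcases List.mem_cons.mp hu with rfl | hu'
        · exact absurd hwp hup
        · exact hpres u hu' hup
    · have hwadj : w ∈ pvAdjOf edges v := hl w (by simp)
      have hdw : pvDist edges w = some (d + 1) := (hsplit w hwadj).mp hwp
      have hchl : w ∈ pvChl edges v := (pv_mem_chl hd).mpr ⟨hwadj, hdw⟩
      have hwverts : w ∈ pvVerts edges := pv_adj_mem_verts hwadj
      have hsw : ∀ u ∈ pvAdjOf edges w, (u ≠ v ↔ pvDist edges u = some (d + 1 + 1)) :=
        pv_hsplit_child h hd hchl
      obtain ⟨hr1, hrgood, hrmono, hrself⟩ :=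
        HMain w (d + 1) v szs (Or.inr hwverts) hdw (by omega) hsw hg
      have hred : pvCalcList (pvAdj edges) f (w :: rest) v p acc szs =
          pvCalcList (pvAdj edges) f rest v p
            (acc + (pvCalc (pvAdj edges) f w v szs).1)
            (pvCalc (pvAdj edges) f w v szs).2 := by
        simp only [pvCalcList]
        rw [if_pos hwp]
      rw [hred]
      obtain ⟨hsum, hgood, hmono, hpres⟩ :=
        ih (acc + (pvCalc (pvAdj edges) f w v szs).1)
          (pvCalc (pvAdj edges) f w v szs).2
          (fun u hu => hl u (by simp [hu])) hrgood
      refine ⟨?_, hgood, fun k val hk => hmono k val (hrmono k val hk), ?_⟩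
      · rw [hsum, hr1, List.filter_cons, if_pos (by simpa using hwp)]
        simp only [List.map_cons, List.sum_cons]
        ring
      · intro u hu hup
        rcases List.mem_cons.mp hu with rfl | hu'
        · exact hmono u (pvSZ edges u) hrself
        · exact hpres u hu' hup

theorem pv_dfs {edges : List (List Int)} (h : pvTree edges) :
    ∀ f (v : Int) (d : Nat) (p : Int) (szs : PySem.Dict Int Int),
      (v = 1 ∨ v ∈ pvVerts edges) → pvDist edges v = some d → pvK edges ≤ f + d →
      (∀ w ∈ pvAdjOf edges v, (w ≠ p ↔ pvDist edges w = some (d + 1))) →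
      pvGood edges szs →
      pvConcl edges szs v (pvCalc (pvAdj edges) f v p szs) ∧
      (∀ w ∈ pvChl edges v,
        (pvCalc (pvAdj edges) f v p szs).2.get? w = some (pvSZ edges w)) := by
  intro f
  induction f using Nat.strong_induction_on with
  | _ f IH =>
    intro v d p szs hv1 hd hK hsplit hg
    have hfpos : 1 ≤ f := by
      rcases hv1 with rfl | hv
      · have h10 : pvDist edges 1 = some 0 := h.2.1
        rw [hd] at h10
        simp only [Option.some.injEq] at h10
        have hKv : pvK edges = 2 * edges.length + 2 := rfl
        omega
      · have := (pv_clause h hv hd).1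
        omega
    obtain ⟨f', rfl⟩ : ∃ f', f = f' + 1 := ⟨f - 1, by omega⟩
    have hred : pvCalc (pvAdj edges) (f' + 1) v p szs =
        ((pvCalcList (pvAdj edges) f' ((pvAdj edges).getD v []) v p 1 szs).1,
         (pvCalcList (pvAdj edges) f' ((pvAdj edges).getD v []) v p 1 szs).2.insert v
           (pvCalcList (pvAdj edges) f' ((pvAdj edges).getD v []) v p 1 szs).1) := by
      simp only [pvCalc]
    rw [pvConcl, hred, pv_adj_getD]
    obtain ⟨hsum, hgood, hmono, hpres⟩ :=
      pv_dfs_list h f' v d p hd hsplit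
        (fun v' d' p' szs' a b c e g => (IH f' (by omega) v' d' p' szs' a b c e g).1)
        (by omega)
        (pvAdjOf edges v) 1 szs (fun u hu => hu) hg
    have hSZ : (pvCalcList (pvAdj edges) f' (pvAdjOf edges v) v p 1 szs).1 = pvSZ edges v := by
      rw [hsum, pv_filter_eq_chl h hd hsplit, pv_SZ_unfold h hd]
    refine ⟨⟨hSZ, ?_, ?_, ?_⟩, ?_⟩
    · -- Good of insert
      intro k val hk
      rw [PySem.Dict.get?_insert] at hk
      by_cases hkv : k = v
      · rw [if_pos hkv] at hk
        simp only [Option.some.injEq] at hk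
        rw [← hk, hSZ, hkv]
      · rw [if_neg hkv] at hk
        exact hgood k val hk
    · -- mono
      intro k val hk
      rw [PySem.Dict.get?_insert]
      by_cases hkv : k = v
      · rw [if_pos hkv]
        have hk2 := hmono k val hk
        have : val = pvSZ edges k := hgood k val hk2
        rw [this, hkv, hSZ]
      · rw [if_neg hkv]
        exact hmono k val hk
    · -- self present
      rw [PySem.Dict.get?_insert, if_pos rfl, hSZ]
    · -- children present
      intro w hw
      have hwne : w ≠ v := pv_chl_ne_self hd hw
      rw [PySem.Dict.get?_insert, if_neg hwne]
      obtain ⟨hwadj, hdw⟩ := (pv_mem_chl hd).mp hw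
      exact hpres w hwadj ((hsplit w hwadj).mpr hdw)

-- ----- the BFS side -----

def pvUniv (edges : List (List Int)) : List Int := (1 :: pvVerts edges).dedup

def pvInv (edges : List (List Int)) (done pend : List Int) (par : PySem.Dict Int Int) : Prop :=
  (done ++ pend).Nodup ∧
  par.keys = done ++ pend ∧
  par.get? 1 = some (-1) ∧
  (∀ v ∈ done ++ pend, v = 1 ∨ (v ∈ pvVerts edges ∧ ∃ dv, pvDist edges v = some (dv + 1) ∧
      par.get? v = some (pvParOf edges v))) ∧
  (∀ v ∈ done, ∀ w ∈ pvChl edges v, w ∈ done ++ pend) ∧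
  (∀ w ∈ done ++ pend, w ≠ 1 → ∃ X Y, done ++ pend = X ++ w :: Y ∧ pvParOf edges w ∈ X)

theorem pv_split_unique : ∀ {X X' Y Y' : List Int} {w : Int},
    X ++ w :: Y = X' ++ w :: Y' → (X ++ w :: Y).Nodup → X = X' ∧ Y = Y' := by
  intro X
  induction X with
  | nil =>
    intro X' Y Y' w heq hnd
    cases X' with
    | nil =>
      simp only [List.nil_append] at heq
      exact ⟨rfl, (List.cons.inj heq).2⟩
    | cons a t =>
      simp only [List.nil_append, List.cons_append] at heq hnd
      obtain ⟨h1, h2⟩ := List.cons.inj heq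
      exfalso
      have hw : w ∈ t ++ w :: Y' := by simp
      rw [← h2] at hw
      exact (List.nodup_cons.mp hnd).1 hw
  | cons x X ih =>
    intro X' Y Y' w heq hnd
    cases X' with
    | nil =>
      simp only [List.cons_append, List.nil_append] at heq hnd
      obtain ⟨h1, h2⟩ := List.cons.inj heq
      exfalso
      have hw : w ∈ X ++ w :: Y := by simp
      rw [h1] at hnd
      exact (List.nodup_cons.mp hnd).1 hw
    | cons a t =>
      simp only [List.cons_append] at heq hnd
      obtain ⟨h1, h2⟩ := List.cons.inj heq
      obtain ⟨e1, e2⟩ := ih h2 (List.nodup_cons.mp hnd).2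
      exact ⟨by rw [h1, e1], e2⟩

theorem pv_before {l P S X Y : List Int} {v w : Int} (hnd : l.Nodup)
    (h1 : l = P ++ v :: S) (h2 : l = X ++ w :: Y) (hvX : v ∈ X) : w ∈ S := by
  obtain ⟨X1, X2, hX⟩ := List.append_of_mem hvX
  subst hX
  rw [h1] at h2 hnd
  have heq : P ++ v :: S = X1 ++ v :: (X2 ++ w :: Y) := by simpa using h2
  have := pv_split_unique heq hnd
  rw [this.2]; simp

theorem pv_bfs_fold {edges : List (List Int)} (h : pvTree edges) (v : Int) (dv : Nat)
    (hdv : pvDist edges v = some dv) (order : List Int) (par0 : PySem.Dict Int Int)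
    (hskip : ∀ w ∈ pvAdjOf edges v, w ∉ pvChl edges v → w ∈ order) :
    ∀ (l : List Int) (p : PySem.Dict Int Int) (ks : List Int),
      (∀ w ∈ l, w ∈ pvAdjOf edges v) →
      p.keys = order ++ ks → (order ++ ks).Nodup →
      (∀ k ∈ ks, k ∈ pvChl edges v) →
      (∀ k ∈ ks, p.get? k = some v) →
      (∀ x, x ∉ ks → p.get? x = par0.get? x) →
      (fun r : PySem.Dict Int Int × List Int =>
        ∃ new, r.2 = ks ++ new ∧ r.1.keys = order ++ r.2 ∧ (order ++ r.2).Nodup ∧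
          (∀ k ∈ r.2, k ∈ pvChl edges v) ∧ (∀ k ∈ r.2, r.1.get? k = some v) ∧
          (∀ x, x ∉ r.2 → r.1.get? x = par0.get? x) ∧ (∀ w ∈ l, w ∈ order ++ r.2))
        (l.foldl (fun (st : PySem.Dict Int Int × List Int) w =>
          if st.1.contains w then st else (st.1.insert w v, st.2 ++ [w])) (p, ks)) := by
  intro l
  induction l with
  | nil =>
    intro p ks _ hkeys hnd hchl hent hpres
    exact ⟨[], by simp, by simpa using hkeys, by simpa using hnd, hchl, hent, hpres, by simp⟩
  | cons w l' ih =>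
    intro p ks hl hkeys hnd hchl hent hpres
    by_cases hc : p.contains w = true
    · rw [List.foldl_cons]
      dsimp only
      rw [if_pos hc]
      obtain ⟨new, e1, e2, e3, e4, e5, e6, e7⟩ :=
        ih p ks (fun u hu => hl u (List.mem_cons_of_mem _ hu)) hkeys hnd hchl hent hpres
      have hwmem : w ∈ order ++ ks := by
        rw [← hkeys]
        exact (PySem.Dict.contains_iff_mem_keys _ _).mp hc
      refine ⟨new, e1, e2, e3, e4, e5, e6, ?_⟩
      intro u hu
      rcases List.mem_cons.mp hu with rfl | hu'
      · rw [e1]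
        rcases List.mem_append.mp hwmem with h1 | h2
        · exact List.mem_append_left _ h1
        · exact List.mem_append_right _ (List.mem_append_left _ h2)
      · exact e7 u hu'
    · have hcf : p.contains w = false := by
        cases hcc : p.contains w
        · rfl
        · exact absurd hcc hc
      rw [List.foldl_cons]
      dsimp only
      rw [if_neg hc]
      have hwadj : w ∈ pvAdjOf edges v := hl w List.mem_cons_self
      have hwnot : w ∉ order ++ ks := by
        intro hm
        rw [← hkeys] at hm
        rw [(PySem.Dict.contains_iff_mem_keys _ _).mpr hm] at hcf
        exact Bool.true_eq_false.mp hcf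
      have hwchl : w ∈ pvChl edges v := by
        by_contra hn
        exact hwnot (List.mem_append_left _ (hskip w hwadj hn))
      have hkeys' : (p.insert w v).keys = order ++ (ks ++ [w]) := by
        rw [PySem.Dict.keys_insert_of_not_contains _ _ hcf, hkeys, List.append_assoc]
      have hnd' : (order ++ (ks ++ [w])).Nodup := by
        rw [show order ++ (ks ++ [w]) = (order ++ ks) ++ [w] from by simp, List.nodup_append]
        refine ⟨hnd, List.nodup_singleton w, ?_⟩
        intro a ha b hb
        simp only [List.mem_singleton] at hb
        subst hb
        exact fun he => hwnot (he ▸ ha)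
      have hchl' : ∀ k ∈ ks ++ [w], k ∈ pvChl edges v := by
        intro k hk
        rcases List.mem_append.mp hk with h1 | h2
        · exact hchl k h1
        · simp only [List.mem_singleton] at h2; subst h2; exact hwchl
      have hwnks : w ∉ ks := fun hm => hwnot (List.mem_append_right _ hm)
      have hent' : ∀ k ∈ ks ++ [w], (p.insert w v).get? k = some v := by
        intro k hk
        rcases List.mem_append.mp hk with h1 | h2
        · have hne : k ≠ w := fun he => hwnks (he ▸ h1)
          rw [PySem.Dict.get?_insert_of_ne _ _ hne]
          exact hent k h1
        · simp only [List.mem_singleton] at h2; subst h2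
          exact PySem.Dict.get?_insert_self _ _ _
      have hpres' : ∀ x, x ∉ ks ++ [w] → (p.insert w v).get? x = par0.get? x := by
        intro x hx
        have hx1 : x ∉ ks := fun hm => hx (List.mem_append_left _ hm)
        have hx2 : x ≠ w := fun he => hx (by simp [he])
        rw [PySem.Dict.get?_insert_of_ne _ _ hx2]
        exact hpres x hx1
      obtain ⟨new', e1, e2, e3, e4, e5, e6, e7⟩ :=
        ih (p.insert w v) (ks ++ [w]) (fun u hu => hl u (List.mem_cons_of_mem _ hu))
          hkeys' hnd' hchl' hent' hpres'
      refine ⟨w :: new', by rw [e1]; simp, e2, e3, e4, e5, e6, ?_⟩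
      intro u hu
      rcases List.mem_cons.mp hu with rfl | hu'
      · rw [e1]
        exact List.mem_append_right _ (by simp)
      · exact e7 u hu'

theorem pv_bfs {edges : List (List Int)} (h : pvTree edges) :
    ∀ f (done pend : List Int) (par : PySem.Dict Int Int),
      pvInv edges done pend par →
      pend.length + ((pvUniv edges).length - (done ++ pend).length) ≤ f →
      pvInv edges (pvBfs (pvAdj edges) f pend par (done ++ pend)).2 []
        (pvBfs (pvAdj edges) f pend par (done ++ pend)).1 := by
  intro f
  induction f using Nat.strong_induction_on with
  | _ f IH =>
    intro done pend par hinv hfuel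
    rcases pend with _ | ⟨v, rest⟩
    · rcases f with _ | f' <;>
        · simp only [pvBfs]
          simpa using hinv
    · rcases f with _ | f'
      · exfalso
        simp only [List.length_cons] at hfuel
        omega
      · obtain ⟨hnd, hkeys, hget1, hmem4, hclos5, hsplit6⟩ := hinv
        have hvmem : v ∈ done ++ v :: rest := by simp
        -- v has a BFS distance
        obtain ⟨dv, hdv⟩ : ∃ dv, pvDist edges v = some dv := by
          rcases hmem4 v hvmem with rfl | ⟨_, dv', hd', _⟩
          · exact ⟨0, h.2.1⟩
          · exact ⟨dv' + 1, hd'⟩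
        -- every non-child neighbour of v is already in the order
        have hskip : ∀ w ∈ pvAdjOf edges v, w ∉ pvChl edges v → w ∈ done ++ v :: rest := by
          intro w hw hnchl
          have hvverts : v ∈ pvVerts edges := pv_src_mem_verts hw
          rcases (pv_clause h hvverts hdv).2.1 w hw with h1 | ⟨d', hd', h2⟩
          · exact absurd ((pv_mem_chl hdv).mpr ⟨hw, h1⟩) hnchl
          · subst hd'
            have hwpar : w = pvParOf edges v := pv_par_unique h hvverts hdv hw h2
            have hvne1 : v ≠ 1 := by
              intro rfl1
              rw [rfl1, h.2.1] at hdv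
              simp only [Option.some.injEq] at hdv
              omega
            obtain ⟨X, Y, hXY, hpX⟩ := hsplit6 v hvmem hvne1
            rw [hXY, hwpar]
            exact List.mem_append_left _ hpX
        have hstep : pvBfs (pvAdj edges) (f' + 1) (v :: rest) par (done ++ v :: rest) =
            pvBfs (pvAdj edges) f'
              (rest ++ (((pvAdj edges).getD v []).foldl
                (fun (st : PySem.Dict Int Int × List Int) w =>
                  if st.1.contains w then st else (st.1.insert w v, st.2 ++ [w]))
                (par, ([] : List Int))).2)
              (((pvAdj edges).getD v []).foldl
                (fun (st : PySem.Dict Int Int × List Int) w =>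
                  if st.1.contains w then st else (st.1.insert w v, st.2 ++ [w]))
                (par, ([] : List Int))).1
              ((done ++ v :: rest) ++ (((pvAdj edges).getD v []).foldl
                (fun (st : PySem.Dict Int Int × List Int) w =>
                  if st.1.contains w then st else (st.1.insert w v, st.2 ++ [w]))
                (par, ([] : List Int))).2) := by
          simp only [pvBfs]
        rw [hstep, pv_adj_getD]
        obtain ⟨new, e1, e2, e3, e4, e5, e6, e7⟩ :=
          pv_bfs_fold h v dv hdv (done ++ v :: rest) par hskip (pvAdjOf edges v) par []
            (fun u hu => hu) (by simpa using hkeys) (by simpa using hnd)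
            (by simp) (by simp) (fun x _ => rfl)
        set st := ((pvAdjOf edges v).foldl
            (fun (st : PySem.Dict Int Int × List Int) w =>
              if st.1.contains w then st else (st.1.insert w v, st.2 ++ [w]))
            (par, ([] : List Int))) with hst
        -- the new invariant for done ++ [v], rest ++ st.2
        have horder : (done ++ [v]) ++ (rest ++ st.2) = (done ++ v :: rest) ++ st.2 := by simp
        have hdisj : ∀ x ∈ done ++ v :: rest, x ∉ st.2 := by
          intro x hx hxs
          have := List.nodup_append.mp e3
          exact this.2.2 x hx x hxs rfl
        have hchl_sub : ∀ w ∈ st.2, w ∈ pvAdjOf edges v := by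
          intro w hw
          exact List.mem_of_mem_filter (e4 w hw)
        have hinv' : pvInv edges (done ++ [v]) (rest ++ st.2) st.1 := by
          refine ⟨?_, ?_, ?_, ?_, ?_, ?_⟩
          · rw [horder]; exact e3
          · rw [horder]; exact e2
          · have h1n : (1 : Int) ∉ st.2 := by
              intro hm
              exact pv_chl_ne_one h hdv (e4 1 hm) rfl
            rw [e6 1 h1n]
            exact hget1
          · intro x hx
            rw [horder] at hx
            rcases List.mem_append.mp hx with hx1 | hx2
            · rcases hmem4 x hx1 with rfl | ⟨hxv, dx, hdx, hgx⟩
              · exact Or.inl rfl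
              · refine Or.inr ⟨hxv, dx, hdx, ?_⟩
                rw [e6 x (hdisj x hx1)]
                exact hgx
            · have hxchl := e4 x hx2
              refine Or.inr ⟨pv_adj_mem_verts (hchl_sub x hx2), dv,
                ((pv_mem_chl hdv).mp hxchl).2, ?_⟩
              rw [e5 x hx2, pv_parOf_child h hdv hxchl]
          · intro x hx w hw
            rw [horder]
            rcases List.mem_append.mp hx with hx1 | hx2
            · exact List.mem_append_left _ (hclos5 x hx1 w hw)
            · simp only [List.mem_singleton] at hx2
              subst hx2
              exact e7 w (List.mem_of_mem_filter hw)
          · intro w hw hwne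
            rw [horder] at hw ⊢
            rcases List.mem_append.mp hw with hw1 | hw2
            · obtain ⟨X, Y, hXY, hpX⟩ := hsplit6 w hw1 hwne
              exact ⟨X, Y ++ st.2, by rw [hXY]; simp, hpX⟩
            · obtain ⟨ks1, ks2, hks⟩ := List.append_of_mem hw2
              refine ⟨(done ++ v :: rest) ++ ks1, ks2, by rw [hks]; simp, ?_⟩
              rw [pv_parOf_child h hdv (e4 w hw2)]
              exact List.mem_append_left _ hvmem
        -- fuel bookkeeping
        have hmemU : ∀ x ∈ (done ++ [v]) ++ (rest ++ st.2), x ∈ pvUniv edges := by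
          intro x hx
          rw [pvUniv, List.mem_dedup]
          rcases hinv'.2.2.2.1 x hx with rfl | ⟨hxv, _⟩
          · exact List.mem_cons_self
          · exact List.mem_cons_of_mem _ hxv
        have hlen : ((done ++ [v]) ++ (rest ++ st.2)).length ≤ (pvUniv edges).length := by
          have hnd'' : ((done ++ [v]) ++ (rest ++ st.2)).Nodup := hinv'.1
          have hsub : ((done ++ [v]) ++ (rest ++ st.2)).toFinset ⊆ (pvUniv edges).toFinset := by
            intro x hx
            rw [List.mem_toFinset] at hx ⊢
            exact hmemU x hx
          calc ((done ++ [v]) ++ (rest ++ st.2)).length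
              = ((done ++ [v]) ++ (rest ++ st.2)).toFinset.card :=
                (List.toFinset_card_of_nodup hnd'').symm
            _ ≤ (pvUniv edges).toFinset.card := Finset.card_le_card hsub
            _ ≤ (pvUniv edges).length := List.toFinset_card_le _
        have hfuel' : (rest ++ st.2).length +
            ((pvUniv edges).length - ((done ++ [v]) ++ (rest ++ st.2)).length) ≤ f' := by
          simp only [List.length_append, List.length_cons] at hfuel hlen ⊢
          omega
        have := IH f' (by omega) (done ++ [v]) (rest ++ st.2) st.1 hinv' hfuel'
        rw [horder] at this
        exact this

theorem pv_sizes_spec {edges : List (List Int)} {par : PySem.Dict Int Int}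
    {order : List Int} (h : pvTree edges) (hfin : pvInv edges order [] par) :
    ∀ (S P : List Int), order = P ++ S → ∀ k,
      ((S.reverse).foldl
        (fun szs v =>
          szs.insert v (((pvAdj edges).getD v []).foldl
            (fun s w => if w ≠ par.getD v 0 then s + szs.getD w 0 else s) 1))
        PySem.Dict.empty).get? k = if k ∈ S then some (pvSZ edges k) else none := by
  have hnd : order.Nodup := by simpa using hfin.1
  intro S
  induction S with
  | nil =>
    intro P _ k
    simp [PySem.Dict.get?_empty]
  | cons v S' ih =>
    intro P horder k
    have hIH := ih (P ++ [v]) (by rw [horder]; simp)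
    have hvmem : v ∈ order := by rw [horder]; simp
    obtain ⟨dv, hdv, hsplit⟩ :
        ∃ dv, pvDist edges v = some dv ∧
          (∀ w ∈ pvAdjOf edges v, (w ≠ par.getD v 0 ↔ pvDist edges w = some (dv + 1))) := by
      rcases hfin.2.2.2.1 v (by simpa using hvmem) with rfl | ⟨hvverts, dv', hdist, hget⟩
      · refine ⟨0, h.2.1, ?_⟩
        have hp : par.getD 1 0 = -1 := by
          rw [PySem.Dict.getD_eq_get?_getD, hfin.2.2.1]
          rfl
        rw [hp]
        intro w hw
        simpa using pv_split_root h hw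
      · refine ⟨dv' + 1, hdist, ?_⟩
        have hp : par.getD v 0 = pvParOf edges v := by
          rw [PySem.Dict.getD_eq_get?_getD, hget]
          rfl
        rw [hp]
        intro w hw
        exact pv_split_nonroot h hvverts hdist hw
    have hchlS : ∀ w ∈ pvChl edges v, w ∈ S' := by
      intro w hw
      have hworder : w ∈ order := by
        have := hfin.2.2.2.2.1 v (by simpa using hvmem) w hw
        simpa using this
      have hwne1 : w ≠ 1 := pv_chl_ne_one h hdv hw
      obtain ⟨X, Y, hXY, hpX⟩ := hfin.2.2.2.2.2 w (by simpa using hworder) hwne1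
      rw [pv_parOf_child h hdv hw] at hpX
      have hXY' : order = X ++ w :: Y := by simpa using hXY
      exact pv_before hnd horder hXY' hpX
    rw [List.reverse_cons, List.foldl_append, List.foldl_cons, List.foldl_nil]
    have hval : ((pvAdj edges).getD v []).foldl
        (fun s w => if w ≠ par.getD v 0 then s + ((S'.reverse).foldl
          (fun szs v =>
            szs.insert v (((pvAdj edges).getD v []).foldl
              (fun s w => if w ≠ par.getD v 0 then s + szs.getD w 0 else s) 1))
          PySem.Dict.empty).getD w 0 else s) 1 = pvSZ edges v := by
      rw [pv_adj_getD, pv_foldl_if_sum, pv_filter_eq_chl h hdv hsplit, pv_SZ_unfold h hdv]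
      congr 1
      apply congrArg List.sum
      apply List.map_congr_left
      intro w hw
      rw [PySem.Dict.getD_eq_get?_getD, hIH w, if_pos (hchlS w hw)]
      rfl
    rw [PySem.Dict.get?_insert]
    by_cases hkv : k = v
    · rw [if_pos hkv, hval, if_pos (by simp [hkv]), hkv]
    · rw [if_neg hkv, hIH k]
      by_cases hkS : k ∈ S'
      · rw [if_pos hkS, if_pos (by simp [hkS])]
      · rw [if_neg hkS, if_neg (by simp [hkv, hkS])]

theorem pv_main {edges : List (List Int)} (n : Int) (hpre : Pre_subtreeRemovalGame n edges) :
    subtreeRemovalGame n edges = subtreeRemovalGame_alt n edges := by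
  obtain ⟨-, h⟩ := hpre
  have hgempty : pvGood edges PySem.Dict.empty := by
    intro k val hk
    rw [PySem.Dict.get?_empty] at hk
    exact absurd hk (by simp)
  have hsplitroot : ∀ w ∈ pvAdjOf edges 1, (w ≠ (-1 : Int) ↔ pvDist edges w = some (0 + 1)) := by
    intro w hw
    simpa using pv_split_root h hw
  obtain ⟨⟨hA1, hAgood, hAmono, hAself⟩, hAchl⟩ :=
    pv_dfs h (2 * edges.length + 3) 1 0 (-1) PySem.Dict.empty (Or.inl rfl) h.2.1
      (by unfold pvK; omega) hsplitroot hgempty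
  have hinv0 : pvInv edges [] [1] (PySem.Dict.empty.insert 1 (-1)) := by
    refine ⟨by simp, by decide, by decide, ?_, by simp, ?_⟩
    · intro x hx
      simp only [List.nil_append, List.mem_singleton] at hx
      exact Or.inl hx
    · intro w hw hne
      simp only [List.nil_append, List.mem_singleton] at hw
      exact absurd hw hne
  have hUlen : (pvUniv edges).length ≤ 1 + 2 * edges.length := by
    have h1 : (pvUniv edges).length ≤ (1 :: pvVerts edges).length :=
      List.Sublist.length_le (List.dedup_sublist _)
    have h2 : (pvVerts edges).length = (pvPairs edges).length := by
      rw [pvVerts, List.length_map]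
    have h3 := pv_pairs_len edges
    simp only [List.length_cons] at h1
    omega
  have hfuel0 : ([1] : List Int).length +
      ((pvUniv edges).length - (([] : List Int) ++ [1]).length) ≤ 2 * edges.length + 3 := by
    simp only [List.length_cons, List.length_nil, List.nil_append]
    omega
  have hbfs : pvInv edges
      (pvBfs (pvAdj edges) (2 * edges.length + 3) [1] (PySem.Dict.empty.insert 1 (-1)) [1]).2 []
      (pvBfs (pvAdj edges) (2 * edges.length + 3) [1] (PySem.Dict.empty.insert 1 (-1)) [1]).1 :=
    pv_bfs h (2 * edges.length + 3) [] [1] (PySem.Dict.empty.insert 1 (-1)) hinv0 hfuel0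
  have hsz := pv_sizes_spec h hbfs
    (pvBfs (pvAdj edges) (2 * edges.length + 3) [1] (PySem.Dict.empty.insert 1 (-1)) [1]).2
    [] rfl
  have h1mem : (1 : Int) ∈
      (pvBfs (pvAdj edges) (2 * edges.length + 3) [1] (PySem.Dict.empty.insert 1 (-1)) [1]).2 := by
    have hkeys := hbfs.2.1
    have hg1 := hbfs.2.2.1
    have hmem : (1 : Int) ∈
        (pvBfs (pvAdj edges) (2 * edges.length + 3) [1] (PySem.Dict.empty.insert 1 (-1)) [1]).1.keys := by
      apply (PySem.Dict.contains_iff_mem_keys _ _).mp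
      rw [PySem.Dict.contains_eq_isSome_get?, hg1]
      rfl
    rw [hkeys] at hmem
    simpa using hmem
  have hadj1 : ∀ w ∈ pvAdjOf edges 1,
      w ∈ (pvBfs (pvAdj edges) (2 * edges.length + 3) [1] (PySem.Dict.empty.insert 1 (-1)) [1]).2 ∧
      w ∈ pvChl edges 1 := by
    intro w hw
    have hwne : w ≠ -1 := pv_adj_ne_neg_one h.1 hw
    have hdw : pvDist edges w = some 1 := (pv_split_root h hw).mp hwne
    have hchl : w ∈ pvChl edges 1 := (pv_mem_chl h.2.1).mpr ⟨hw, hdw⟩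
    refine ⟨?_, hchl⟩
    have := hbfs.2.2.2.2.1 1 h1mem w hchl
    simpa using this
  have hxa : ((pvAdjOf edges 1).foldl
      (fun a nb => if nb ≠ -1 then PySem.Int.bxor a
        ((pvCalc (pvAdj edges) (2 * edges.length + 3) 1 (-1) PySem.Dict.empty).2.getD nb 0) else a) 0) =
      ((pvAdjOf edges 1).foldl (fun a w => PySem.Int.bxor a (pvSZ edges w)) 0) := by
    apply PySem.List.foldl_congr_mem
    intro acc x hx
    rw [if_pos (pv_adj_ne_neg_one h.1 hx)]
    have hchl : x ∈ pvChl edges 1 := (hadj1 x hx).2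
    rw [PySem.Dict.getD_eq_get?_getD, hAchl x hchl]
    rfl
  have hxb : ((pvAdjOf edges 1).foldl
      (fun a w => PySem.Int.bxor a
        ((pvSizes (pvAdj edges)
          (pvBfs (pvAdj edges) (2 * edges.length + 3) [1] (PySem.Dict.empty.insert 1 (-1)) [1]).1
          (pvBfs (pvAdj edges) (2 * edges.length + 3) [1] (PySem.Dict.empty.insert 1 (-1)) [1]).2).getD w 0)) 0) =
      ((pvAdjOf edges 1).foldl (fun a w => PySem.Int.bxor a (pvSZ edges w)) 0) := by
    apply PySem.List.foldl_congr_mem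
    intro acc x hx
    have hxm := (hadj1 x hx).1
    rw [pvSizes, PySem.Dict.getD_eq_get?_getD, hsz x, if_pos hxm]
    rfl
  show (if ((pvAdj edges).getD 1 []).foldl
      (fun a nb => if nb ≠ -1 then PySem.Int.bxor a
        ((pvCalc (pvAdj edges) (2 * edges.length + 3) 1 (-1) PySem.Dict.empty).2.getD nb 0) else a) 0 ≠ 0
      then "Alice" else "Bob") =
    (if ((pvAdj edges).getD 1 []).foldl
      (fun a w => PySem.Int.bxor a
        ((pvSizes (pvAdj edges)
          (pvBfs (pvAdj edges) (2 * edges.length + 3) [1] (PySem.Dict.empty.insert 1 (-1)) [1]).1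
          (pvBfs (pvAdj edges) (2 * edges.length + 3) [1] (PySem.Dict.empty.insert 1 (-1)) [1]).2).getD w 0)) 0 ≠ 0
      then "Alice" else "Bob")
  rw [pv_adj_getD, hxa, hxb]

-- ===== VERDICT (by name: the statement is the Claim_ definition above) =====
theorem subtreeRemovalGame_spec : Claim_equal_subtreeRemovalGame := by
  intro n edges _ hpre
  unfold Spec_subtreeRemovalGame
  exact pv_main n hpre
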